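-- pv_equiv track=rewrite | github.com/BordingCode/babynames | data/convert.py | get_ending
-- ===== SOURCE A (Python) =====
-- def get_ending(name):
--     """Classify the ending pattern of a name."""
--     lower = name.lower()
--     # Check common endings from longest to shortest
--     endings = [
--         'ette', 'ine', 'ina', 'ina', 'elle', 'anna',
--         'ie', 'ia', 'ea', 'ee', 'ey',
--         'a', 'e', 'i', 'o', 'y'
--     ]
--     for end in endings:
--         if lower.endswith(end):
--             return end
--     return lower[-1] if lower else ''
-- ===== SOURCE B (Python) =====
-- def get_ending(name):
--     """Classify the ending pattern of a name."""
--     lower = name.lower()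
--     endings = {
--         'ette', 'ine', 'ina', 'elle', 'anna',
--         'ie', 'ia', 'ea', 'ee', 'ey',
--         'a', 'e', 'i', 'o', 'y'
--     }
--     # Single backward character scan: grow the suffix one character at a time
--     # and remember the longest one that is a known ending.  The initial value
--     # lower[-1:] is the last-character fallback (and '' for the empty string).
--     suffix = ''
--     best = lower[-1:]
--     for ch in reversed(lower[-4:]):
--         suffix = ch + suffix
--         if suffix in endings:
--             best = suffix
--     return best
-- ===== Notes on version B (the rewrite author's own statement) =====
-- stated objective: alternative
-- what changed: B replaces A's loop over a 16-ending list tested with endswith by a single backward character scan over the last four characters that grows the suffix one character at a time and keeps the longest one found in an ending set, seeded with the last-character fallback lower[-1:].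
import Mathlib
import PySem

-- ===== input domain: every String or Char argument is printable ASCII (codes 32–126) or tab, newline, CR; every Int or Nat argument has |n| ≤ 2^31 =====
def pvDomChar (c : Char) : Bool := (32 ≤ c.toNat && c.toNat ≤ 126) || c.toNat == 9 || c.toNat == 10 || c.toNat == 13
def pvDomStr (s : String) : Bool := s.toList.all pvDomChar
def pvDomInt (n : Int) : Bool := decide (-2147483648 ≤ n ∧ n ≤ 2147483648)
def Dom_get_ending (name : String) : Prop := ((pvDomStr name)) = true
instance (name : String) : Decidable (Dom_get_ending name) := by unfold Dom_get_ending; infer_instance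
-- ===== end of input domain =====

-- B replaces A's loop over a 16-ending list tested with endswith by a single backward
-- character scan that grows the suffix one character at a time and keeps the longest one
-- found in the ending set, seeded with the last-character fallback (objective: alternative).

-- ===== PORT A =====
-- the for-loop over `endings` with early return; [] is the final
-- `return lower[-1] if lower else ''` (pyGet? (-1) is none exactly when lower is empty)
def pvScanEndings (lower : String) : List String → String
  | [] =>
    match PySem.Str.pyGet? lower (-1) with
    | some c => String.ofList [c]
    | none => ""
  | e :: rest => if PySem.Str.endswith lower e then e else pvScanEndings lower rest

def get_ending (name : String) : String :=
  let lower := PySem.Str.lower name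
  pvScanEndings lower
    ["ette", "ine", "ina", "ina", "elle", "anna",
     "ie", "ia", "ea", "ee", "ey",
     "a", "e", "i", "o", "y"]

-- ===== PORT B =====
-- the loop body `suffix = ch + suffix; if suffix in endings: best = suffix` (the suffix is
-- kept as its char list, turned into a String where Python tests/stores the string)
def pvStep (endings : List String) (st : List Char × String) (c : Char) : List Char × String :=
  let s' := c :: st.1
  (s', if endings.contains (String.ofList s') then String.ofList s' else st.2)

-- single backward scan over reversed(lower[-4:]): grow the suffix, remember the longest
-- one in the ending set; `best` starts as the fallback lower[-1:]
def get_ending_alt (name : String) : String :=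
  let lower := PySem.Str.lower name
  let endings := PySem.Set.ofList
    ["ette", "ine", "ina", "elle", "anna", "ie", "ia", "ea", "ee", "ey",
     "a", "e", "i", "o", "y"]
  let best0 := PySem.Str.slice lower (some (-1)) none
  ((PySem.Str.slice lower (some (-4)) none).toList.reverse.foldl
      (pvStep endings) ([], best0)).2

-- ===== PRECONDITION & SPEC =====
def Spec_get_ending (name : String) (out : String) : Prop := out = get_ending_alt name
instance (name : String) (out : String) : Decidable (Spec_get_ending name out) := by unfold Spec_get_ending; infer_instance

-- ===== CLAIM =====
def Claim_equal_get_ending : Prop := ∀ (name : String), Dom_get_ending name → Spec_get_ending name (get_ending name)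

-- ===== LEMMAS AND PROOFS =====

-- the Python set literal, as its (distinct) element list
def pvEndings : List String :=
  ["ette", "ine", "ina", "elle", "anna", "ie", "ia", "ea", "ee", "ey",
   "a", "e", "i", "o", "y"]

lemma pv_set_eq : PySem.Set.ofList
    ["ette", "ine", "ina", "elle", "anna", "ie", "ia", "ea", "ee", "ey",
     "a", "e", "i", "o", "y"] = pvEndings := by decide

lemma pv_ofList_eq (l : List Char) (s : String) : String.ofList l = s ↔ l = s.toList := by
  constructor
  · rintro rfl; simp
  · rintro rfl; simp

lemma pv_drop_suffix_iff (e l : List Char) :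
    l.drop (l.length - e.length) = e ↔ e <:+ l := by
  rw [List.suffix_iff_eq_drop]; exact eq_comm

-- two suffixes of the same list: the shorter is a suffix of the longer
lemma pv_suffix_trans_len {l e1 e2 : List Char} (h1 : e1 <:+ l) (h2 : e2 <:+ l)
    (hle : e1.length ≤ e2.length) : e1 <:+ e2 := by
  rcases List.suffix_or_suffix_of_suffix h1 h2 with h | h
  · exact h
  · exact (List.IsSuffix.eq_of_length_le h hle) ▸ List.suffix_refl _

lemma pv_single_suffix (c : Char) (l : List Char) :
    [c] <:+ l ↔ l.getLast? = some c := by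
  rw [List.getLast?_eq_some_iff]
  constructor
  · rintro ⟨t, rfl⟩; exact ⟨t, rfl⟩
  · rintro ⟨t, rfl⟩; exact ⟨t, rfl⟩

lemma pv_ne_single (u : List Char) (d c : Char) (hu : u ≠ []) : u ++ [d] ≠ [c] := by
  intro h
  have := congrArg List.length h
  simp at this
  exact hu this

-- folding further characters never changes `best` when no extended suffix is an ending
lemma pv_fold_no_match (S : List String) (w s0 : List Char) (b : String)
    (h : ∀ u, u ≠ [] → u <:+ w → ¬ (S.contains (String.ofList (u ++ s0)) = true)) :
    w.reverse.foldl (pvStep S) (s0, b) = (w ++ s0, b) := by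
  induction w with
  | nil => simp
  | cons x w' ih =>
      rw [List.reverse_cons, List.foldl_append,
        ih (fun u hu hsuf => h u hu (hsuf.trans (List.suffix_cons x w')))]
      simp only [List.foldl_cons, List.foldl_nil, pvStep]
      simp only [← List.cons_append]
      rw [if_neg (h (x :: w') (by simp) (List.suffix_refl _))]

-- B's scan over the last-four window returns e when e ends the window and no longer
-- window suffix is an ending
lemma pv_fold_hit (S : List String) (t4 : List Char) (e : String) (b0 : String)
    (he : e.toList <:+ t4)
    (hfold : e.toList.reverse.foldl (pvStep S) ([], b0) = (e.toList, e))
    (hno : ∀ u, u ≠ [] → u ++ e.toList <:+ t4 →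
      ¬ (S.contains (String.ofList (u ++ e.toList)) = true)) :
    (t4.reverse.foldl (pvStep S) ([], b0)).2 = e := by
  obtain ⟨w, rfl⟩ := he
  rw [List.reverse_append, List.foldl_append, hfold,
    pv_fold_no_match S w e.toList e (fun u hu hsuf => by
      obtain ⟨v, rfl⟩ := hsuf
      exact hno u hu ⟨v, by simp⟩)]

lemma pv_drop_last {l : List Char} {d : Char} (hd : l.getLast? = some d) :
    l.drop (l.length - 1) = [d] := by
  have h1 : [d] <:+ l := (pv_single_suffix d l).mpr hd
  have h2 := (pv_drop_suffix_iff [d] l).mpr h1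
  simpa using h2

-- A's tail: the five single-character checks plus the fallback return lower[-1:]
lemma pv_singles (s : String) :
    pvScanEndings s ["a", "e", "i", "o", "y"] =
      String.ofList (s.toList.drop (s.toList.length - 1)) := by
  have hget : PySem.Str.pyGet? s (-1) = s.toList.getLast? := by
    simp [PySem.List.pyGet?_neg_one]
  have sw : ∀ (e : String) (c : Char), e.toList = [c] →
      ((PySem.Str.endswith s e = true) ↔ s.toList.getLast? = some c) := by
    intro e c he
    have h : (PySem.Str.endswith s e = true) ↔ e.toList <:+ s.toList := by
      simp [PySem.Chars.endswith_iff]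
    rw [h, he, pv_single_suffix]
  simp only [pvScanEndings]
  rcases hl : s.toList.getLast? with _ | d
  · have hnil : s.toList = [] := List.getLast?_eq_none_iff.mp hl
    rw [if_neg (fun h => by simpa [hl] using (sw "a" 'a' rfl).mp h),
        if_neg (fun h => by simpa [hl] using (sw "e" 'e' rfl).mp h),
        if_neg (fun h => by simpa [hl] using (sw "i" 'i' rfl).mp h),
        if_neg (fun h => by simpa [hl] using (sw "o" 'o' rfl).mp h),
        if_neg (fun h => by simpa [hl] using (sw "y" 'y' rfl).mp h),
        hget, hl, hnil]
    simp
  · rw [pv_drop_last hl]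
    by_cases ha : d = 'a'
    · subst ha; rw [if_pos ((sw "a" 'a' rfl).mpr hl)]
    rw [if_neg (fun h => ha (by simpa [hl] using (sw "a" 'a' rfl).mp h))]
    by_cases he : d = 'e'
    · subst he; rw [if_pos ((sw "e" 'e' rfl).mpr hl)]
    rw [if_neg (fun h => he (by simpa [hl] using (sw "e" 'e' rfl).mp h))]
    by_cases hi : d = 'i'
    · subst hi; rw [if_pos ((sw "i" 'i' rfl).mpr hl)]
    rw [if_neg (fun h => hi (by simpa [hl] using (sw "i" 'i' rfl).mp h))]
    by_cases ho : d = 'o'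
    · subst ho; rw [if_pos ((sw "o" 'o' rfl).mpr hl)]
    rw [if_neg (fun h => ho (by simpa [hl] using (sw "o" 'o' rfl).mp h))]
    by_cases hy : d = 'y'
    · subst hy; rw [if_pos ((sw "y" 'y' rfl).mpr hl)]
    rw [if_neg (fun h => hy (by simpa [hl] using (sw "y" 'y' rfl).mp h))]
    rw [hget, hl]

theorem pvMain (s : String) :
    pvScanEndings s
      ["ette", "ine", "ina", "ina", "elle", "anna",
       "ie", "ia", "ea", "ee", "ey", "a", "e", "i", "o", "y"] =
    ((s.toList.drop (s.toList.length - 4)).reverse.foldl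
      (pvStep pvEndings) ([], PySem.Str.slice s (some (-1)) none)).2 := by
  have ew : ∀ e : String, (PySem.Str.endswith s e = true) ↔ e.toList <:+ s.toList := fun e => by
    simp [PySem.Chars.endswith_iff]
  have hb0 : PySem.Str.slice s (some (-1)) none
      = String.ofList (s.toList.drop (s.toList.length - 1)) := by
    rw [← String.toList_inj]; simp [pysem]
  rw [hb0]
  set l := s.toList with hldef
  have ht4s : l.drop (l.length - 4) <:+ l := List.drop_suffix _ _
  have ht4len : (l.drop (l.length - 4)).length = l.length - (l.length - 4) := by simp
  set t4 := l.drop (l.length - 4) with ht4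
  simp only [pvScanEndings]
  by_cases hEtte : ("ette" : String).toList <:+ l
  · rw [if_pos ((ew _).mpr hEtte)]
    refine (pv_fold_hit pvEndings t4 "ette" _ ?_ (by simp [pvStep, pvEndings]) ?_).symm
    · refine pv_suffix_trans_len hEtte ht4s ?_
      have h0 := hEtte.length_le
      rw [ht4len]
      simp at h0 ⊢
      omega
    · intro u hu hsuf hc
      have h1 := hsuf.length_le
      have h2 := List.length_pos_of_ne_nil hu
      rw [ht4len] at h1
      simp at h1
      omega
  rw [if_neg (fun h => hEtte ((ew _).mp h))]
  by_cases hIne : ("ine" : String).toList <:+ l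
  · rw [if_pos ((ew _).mpr hIne)]
    refine (pv_fold_hit pvEndings t4 "ine" _ ?_ (by simp [pvStep, pvEndings]) ?_).symm
    · refine pv_suffix_trans_len hIne ht4s ?_
      have h0 := hIne.length_le
      rw [ht4len]
      simp at h0 ⊢
      omega
    · intro u hu hsuf hc
      have h1 := hsuf.length_le
      have h2 := List.length_pos_of_ne_nil hu
      rw [ht4len] at h1
      simp at h1
      rcases u with _ | ⟨x, u'⟩
      · exact absurd rfl hu
      rcases u' with _ | ⟨y, u''⟩
      · simp [pvEndings, pv_ofList_eq] at hc
      · simp at h1; omega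
  rw [if_neg (fun h => hIne ((ew _).mp h))]
  by_cases hIna : ("ina" : String).toList <:+ l
  · rw [if_pos ((ew _).mpr hIna)]
    refine (pv_fold_hit pvEndings t4 "ina" _ ?_ (by simp [pvStep, pvEndings]) ?_).symm
    · refine pv_suffix_trans_len hIna ht4s ?_
      have h0 := hIna.length_le
      rw [ht4len]
      simp at h0 ⊢
      omega
    · intro u hu hsuf hc
      have h1 := hsuf.length_le
      have h2 := List.length_pos_of_ne_nil hu
      rw [ht4len] at h1
      simp at h1
      rcases u with _ | ⟨x, u'⟩
      · exact absurd rfl hu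
      rcases u' with _ | ⟨y, u''⟩
      · simp [pvEndings, pv_ofList_eq] at hc
      · simp at h1; omega
  rw [if_neg (fun h => hIna ((ew _).mp h))]
  rw [if_neg (fun h => hIna ((ew _).mp h))]
  by_cases hElle : ("elle" : String).toList <:+ l
  · rw [if_pos ((ew _).mpr hElle)]
    refine (pv_fold_hit pvEndings t4 "elle" _ ?_ (by simp [pvStep, pvEndings]) ?_).symm
    · refine pv_suffix_trans_len hElle ht4s ?_
      have h0 := hElle.length_le
      rw [ht4len]
      simp at h0 ⊢
      omega
    · intro u hu hsuf hc
      have h1 := hsuf.length_le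
      have h2 := List.length_pos_of_ne_nil hu
      rw [ht4len] at h1
      simp at h1
      omega
  rw [if_neg (fun h => hElle ((ew _).mp h))]
  by_cases hAnna : ("anna" : String).toList <:+ l
  · rw [if_pos ((ew _).mpr hAnna)]
    refine (pv_fold_hit pvEndings t4 "anna" _ ?_ (by simp [pvStep, pvEndings]) ?_).symm
    · refine pv_suffix_trans_len hAnna ht4s ?_
      have h0 := hAnna.length_le
      rw [ht4len]
      simp at h0 ⊢
      omega
    · intro u hu hsuf hc
      have h1 := hsuf.length_le
      have h2 := List.length_pos_of_ne_nil hu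
      rw [ht4len] at h1
      simp at h1
      omega
  rw [if_neg (fun h => hAnna ((ew _).mp h))]
  by_cases hIe : ("ie" : String).toList <:+ l
  · rw [if_pos ((ew _).mpr hIe)]
    refine (pv_fold_hit pvEndings t4 "ie" _ ?_ (by simp [pvStep, pvEndings]) ?_).symm
    · refine pv_suffix_trans_len hIe ht4s ?_
      have h0 := hIe.length_le
      rw [ht4len]
      simp at h0 ⊢
      omega
    · intro u hu hsuf hc
      have h1 := hsuf.length_le
      have h2 := List.length_pos_of_ne_nil hu
      rw [ht4len] at h1
      simp at h1
      rcases u with _ | ⟨x, u'⟩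
      · exact absurd rfl hu
      rcases u' with _ | ⟨y, u''⟩
      · simp [pvEndings, pv_ofList_eq] at hc
      rcases u'' with _ | ⟨z, u'''⟩
      · simp [pvEndings, pv_ofList_eq] at hc
      · simp at h1; omega
  rw [if_neg (fun h => hIe ((ew _).mp h))]
  by_cases hIa : ("ia" : String).toList <:+ l
  · rw [if_pos ((ew _).mpr hIa)]
    refine (pv_fold_hit pvEndings t4 "ia" _ ?_ (by simp [pvStep, pvEndings]) ?_).symm
    · refine pv_suffix_trans_len hIa ht4s ?_
      have h0 := hIa.length_le
      rw [ht4len]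
      simp at h0 ⊢
      omega
    · intro u hu hsuf hc
      have h1 := hsuf.length_le
      have h2 := List.length_pos_of_ne_nil hu
      rw [ht4len] at h1
      simp at h1
      rcases u with _ | ⟨x, u'⟩
      · exact absurd rfl hu
      rcases u' with _ | ⟨y, u''⟩
      · simp [pvEndings, pv_ofList_eq] at hc
      rcases u'' with _ | ⟨z, u'''⟩
      · simp [pvEndings, pv_ofList_eq] at hc
      · simp at h1; omega
  rw [if_neg (fun h => hIa ((ew _).mp h))]
  by_cases hEa : ("ea" : String).toList <:+ l
  · rw [if_pos ((ew _).mpr hEa)]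
    refine (pv_fold_hit pvEndings t4 "ea" _ ?_ (by simp [pvStep, pvEndings]) ?_).symm
    · refine pv_suffix_trans_len hEa ht4s ?_
      have h0 := hEa.length_le
      rw [ht4len]
      simp at h0 ⊢
      omega
    · intro u hu hsuf hc
      have h1 := hsuf.length_le
      have h2 := List.length_pos_of_ne_nil hu
      rw [ht4len] at h1
      simp at h1
      rcases u with _ | ⟨x, u'⟩
      · exact absurd rfl hu
      rcases u' with _ | ⟨y, u''⟩
      · simp [pvEndings, pv_ofList_eq] at hc
      rcases u'' with _ | ⟨z, u'''⟩
      · simp [pvEndings, pv_ofList_eq] at hc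
      · simp at h1; omega
  rw [if_neg (fun h => hEa ((ew _).mp h))]
  by_cases hEe : ("ee" : String).toList <:+ l
  · rw [if_pos ((ew _).mpr hEe)]
    refine (pv_fold_hit pvEndings t4 "ee" _ ?_ (by simp [pvStep, pvEndings]) ?_).symm
    · refine pv_suffix_trans_len hEe ht4s ?_
      have h0 := hEe.length_le
      rw [ht4len]
      simp at h0 ⊢
      omega
    · intro u hu hsuf hc
      have h1 := hsuf.length_le
      have h2 := List.length_pos_of_ne_nil hu
      rw [ht4len] at h1
      simp at h1
      rcases u with _ | ⟨x, u'⟩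
      · exact absurd rfl hu
      rcases u' with _ | ⟨y, u''⟩
      · simp [pvEndings, pv_ofList_eq] at hc
      rcases u'' with _ | ⟨z, u'''⟩
      · simp [pvEndings, pv_ofList_eq] at hc
      · simp at h1; omega
  rw [if_neg (fun h => hEe ((ew _).mp h))]
  by_cases hEy : ("ey" : String).toList <:+ l
  · rw [if_pos ((ew _).mpr hEy)]
    refine (pv_fold_hit pvEndings t4 "ey" _ ?_ (by simp [pvStep, pvEndings]) ?_).symm
    · refine pv_suffix_trans_len hEy ht4s ?_
      have h0 := hEy.length_le
      rw [ht4len]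
      simp at h0 ⊢
      omega
    · intro u hu hsuf hc
      have h1 := hsuf.length_le
      have h2 := List.length_pos_of_ne_nil hu
      rw [ht4len] at h1
      simp at h1
      rcases u with _ | ⟨x, u'⟩
      · exact absurd rfl hu
      rcases u' with _ | ⟨y, u''⟩
      · simp [pvEndings, pv_ofList_eq] at hc
      rcases u'' with _ | ⟨z, u'''⟩
      · simp [pvEndings, pv_ofList_eq] at hc
      · simp at h1; omega
  rw [if_neg (fun h => hEy ((ew _).mp h))]
  have htail : (if PySem.Str.endswith s "a" = true then "a"
      else if PySem.Str.endswith s "e" = true then "e"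
      else if PySem.Str.endswith s "i" = true then "i"
      else if PySem.Str.endswith s "o" = true then "o"
      else if PySem.Str.endswith s "y" = true then "y"
      else match PySem.Str.pyGet? s (-1) with
        | some c => String.ofList [c]
        | none => "") = pvScanEndings s ["a", "e", "i", "o", "y"] := rfl
  rw [htail, pv_singles]
  rcases hl0 : l.getLast? with _ | d
  · have hnil : l = [] := List.getLast?_eq_none_iff.mp hl0
    rw [ht4, hnil]
    have hz : s.length = 0 := by
      have h := congrArg List.length hnil
      simp only [hldef, List.length_nil] at h
      simpa using h
    simp [hz]
    exact String.toList_inj.mp hnil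
  · have hd1 : [d] <:+ l := (pv_single_suffix d l).mpr hl0
    have hdl : l.drop (l.length - 1) = [d] := pv_drop_last hl0
    have hdt4 : [d] <:+ t4 := by
      refine pv_suffix_trans_len hd1 ht4s ?_
      have h0 := hd1.length_le
      rw [ht4len]
      simp at h0 ⊢
      omega
    obtain ⟨w, hw⟩ := hdt4
    rw [hdl, ← hw, List.reverse_append, List.foldl_append]
    have hstep : ([d].reverse.foldl (pvStep pvEndings) ([], String.ofList [d]))
        = ([d], String.ofList [d]) := by simp [pvStep]
    rw [hstep, pv_fold_no_match pvEndings w [d] (String.ofList [d]) ?_]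
    · intro u hu hsuf hc
      have hsl : u ++ [d] <:+ l := by
        obtain ⟨v, rfl⟩ := hsuf
        exact (List.IsSuffix.trans ⟨v, by rw [← hw]; simp⟩ ht4s)
      have hmem : String.ofList (u ++ [d]) ∈ pvEndings := by simpa using hc
      simp only [pvEndings, List.mem_cons, List.not_mem_nil, or_false] at hmem
      rcases hmem with h|h|h|h|h|h|h|h|h|h|h|h|h|h|h
      · exact hEtte (((pv_ofList_eq _ _).mp h) ▸ hsl)
      · exact hIne (((pv_ofList_eq _ _).mp h) ▸ hsl)
      · exact hIna (((pv_ofList_eq _ _).mp h) ▸ hsl)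
      · exact hElle (((pv_ofList_eq _ _).mp h) ▸ hsl)
      · exact hAnna (((pv_ofList_eq _ _).mp h) ▸ hsl)
      · exact hIe (((pv_ofList_eq _ _).mp h) ▸ hsl)
      · exact hIa (((pv_ofList_eq _ _).mp h) ▸ hsl)
      · exact hEa (((pv_ofList_eq _ _).mp h) ▸ hsl)
      · exact hEe (((pv_ofList_eq _ _).mp h) ▸ hsl)
      · exact hEy (((pv_ofList_eq _ _).mp h) ▸ hsl)
      · exact pv_ne_single u d 'a' hu ((pv_ofList_eq _ _).mp h)
      · exact pv_ne_single u d 'e' hu ((pv_ofList_eq _ _).mp h)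
      · exact pv_ne_single u d 'i' hu ((pv_ofList_eq _ _).mp h)
      · exact pv_ne_single u d 'o' hu ((pv_ofList_eq _ _).mp h)
      · exact pv_ne_single u d 'y' hu ((pv_ofList_eq _ _).mp h)

-- ===== VERDICT =====
theorem get_ending_spec : Claim_equal_get_ending := by
  intro name _
  unfold Spec_get_ending
  show pvScanEndings (PySem.Str.lower name)
      ["ette", "ine", "ina", "ina", "elle", "anna",
       "ie", "ia", "ea", "ee", "ey", "a", "e", "i", "o", "y"] =
    ((PySem.Str.slice (PySem.Str.lower name) (some (-4)) none).toList.reverse.foldl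
      (pvStep (PySem.Set.ofList
        ["ette", "ine", "ina", "elle", "anna", "ie", "ia", "ea", "ee", "ey",
         "a", "e", "i", "o", "y"]))
      ([], PySem.Str.slice (PySem.Str.lower name) (some (-1)) none)).2
  rw [pv_set_eq,
    show (PySem.Str.slice (PySem.Str.lower name) (some (-4)) none).toList
        = (PySem.Str.lower name).toList.drop ((PySem.Str.lower name).toList.length - 4) from
      by simp [pysem]]
  exact pvMain _
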